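-- pv_equiv track=rewrite | github.com/Paintedstork28/fact-checker | source_scorer.py | _domain_score
-- ===== SOURCE A (Python) =====
-- TIER_1 = {
--     "reuters.com", "apnews.com", "bbc.com", "bbc.co.uk",
--     "nature.com", "sciencedirect.com", "who.int", "un.org",
--     "nih.gov", "cdc.gov", "nasa.gov", "pubmed.ncbi.nlm.nih.gov",
--     "nejm.org", "thelancet.com", "science.org",
-- }
--
-- TIER_2 = {
--     "nytimes.com", "washingtonpost.com", "theguardian.com",
--     "economist.com", "ft.com", "bloomberg.com", "cnbc.com",
--     "wikipedia.org", "en.wikipedia.org", "britannica.com",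
--     "pbs.org", "npr.org", "aljazeera.com",
--     "thehindu.com", "ndtv.com", "livemint.com",
--     "techcrunch.com", "arstechnica.com", "wired.com",
--     "snopes.com", "factcheck.org", "politifact.com",
-- }
--
-- TIER_3 = {
--     "medium.com", "substack.com", "wordpress.com",
--     "forbes.com", "businessinsider.com", "huffpost.com",
--     "indiatimes.com", "timesofindia.indiatimes.com",
-- }
--
-- GOV_EDU_TLDS = {".gov", ".edu", ".ac.uk", ".gov.in", ".nic.in"}
--
-- def _domain_score(domain):
--     """Score a domain based on tier membership."""
--     if domain in TIER_1:
--         return 10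
--     if domain in TIER_2:
--         return 7
--     if domain in TIER_3:
--         return 4
--     # Check TLD
--     for tld in GOV_EDU_TLDS:
--         if domain.endswith(tld):
--             return 9
--     # Check if subdomain of a tier-1/2 site
--     for t1 in TIER_1:
--         if domain.endswith("." + t1):
--             return 9
--     for t2 in TIER_2:
--         if domain.endswith("." + t2):
--             return 7
--     return 2  # Unknown domain
-- ===== SOURCE B (Python) =====
-- TIER_1 = {
--     "reuters.com", "apnews.com", "bbc.com", "bbc.co.uk",
--     "nature.com", "sciencedirect.com", "who.int", "un.org",
--     "nih.gov", "cdc.gov", "nasa.gov", "pubmed.ncbi.nlm.nih.gov",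
--     "nejm.org", "thelancet.com", "science.org",
-- }
--
-- TIER_2 = {
--     "nytimes.com", "washingtonpost.com", "theguardian.com",
--     "economist.com", "ft.com", "bloomberg.com", "cnbc.com",
--     "wikipedia.org", "en.wikipedia.org", "britannica.com",
--     "pbs.org", "npr.org", "aljazeera.com",
--     "thehindu.com", "ndtv.com", "livemint.com",
--     "techcrunch.com", "arstechnica.com", "wired.com",
--     "snopes.com", "factcheck.org", "politifact.com",
-- }
--
-- TIER_3 = {
--     "medium.com", "substack.com", "wordpress.com",
--     "forbes.com", "businessinsider.com", "huffpost.com",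
--     "indiatimes.com", "timesofindia.indiatimes.com",
-- }
--
-- GOV_EDU_TLDS = {".gov", ".edu", ".ac.uk", ".gov.in", ".nic.in"}
--
-- # every suffix-with-a-leading-dot check of A reduces to membership of a
-- # dot-boundary suffix of `domain` in the set with the leading dot stripped
-- GOV_EDU_SUFFIXES = {t[1:] for t in GOV_EDU_TLDS}
--
--
-- def _domain_score(domain):
--     """Score a domain based on tier membership."""
--     if domain in TIER_1:
--         return 10
--     if domain in TIER_2:
--         return 7
--     if domain in TIER_3:
--         return 4
--     # all strict dot-boundary suffixes: the text after each '.' in domain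
--     suffixes = [domain[i + 1:] for i, c in enumerate(domain) if c == "."]
--     if any(s in GOV_EDU_SUFFIXES for s in suffixes):
--         return 9
--     if any(s in TIER_1 for s in suffixes):
--         return 9
--     if any(s in TIER_2 for s in suffixes):
--         return 7
--     return 2
-- ===== Notes on version B (the rewrite author's own statement) =====
-- stated objective: alternative
-- what changed: Instead of scanning all 41 tier/TLD entries with endswith, B computes the dot-boundary suffixes of the domain once (the text after each '.') and decides each rule by set membership of those suffixes, preserving A's exact precedence of checks.
import Mathlib
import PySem

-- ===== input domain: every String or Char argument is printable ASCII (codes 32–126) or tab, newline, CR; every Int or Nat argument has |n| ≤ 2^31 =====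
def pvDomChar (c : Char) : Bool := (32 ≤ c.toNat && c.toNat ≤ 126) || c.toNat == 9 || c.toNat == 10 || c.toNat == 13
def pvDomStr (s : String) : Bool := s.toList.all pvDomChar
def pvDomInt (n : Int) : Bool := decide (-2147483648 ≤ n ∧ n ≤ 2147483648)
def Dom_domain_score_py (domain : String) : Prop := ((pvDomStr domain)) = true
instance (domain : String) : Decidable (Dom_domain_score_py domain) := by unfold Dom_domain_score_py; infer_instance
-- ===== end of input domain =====

-- B replaces A's per-entry endswith scans by computing the dot-boundary suffixes of the
-- domain once and testing set membership (alternative decomposition, same exact result).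

-- ===== PORT A =====
-- the module-level constants (Python sets of strings; all elements distinct)
def pvTier1 : PySem.Set String := PySem.Set.ofList
  ["reuters.com", "apnews.com", "bbc.com", "bbc.co.uk",
   "nature.com", "sciencedirect.com", "who.int", "un.org",
   "nih.gov", "cdc.gov", "nasa.gov", "pubmed.ncbi.nlm.nih.gov",
   "nejm.org", "thelancet.com", "science.org"]

def pvTier2 : PySem.Set String := PySem.Set.ofList
  ["nytimes.com", "washingtonpost.com", "theguardian.com",
   "economist.com", "ft.com", "bloomberg.com", "cnbc.com",
   "wikipedia.org", "en.wikipedia.org", "britannica.com",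
   "pbs.org", "npr.org", "aljazeera.com",
   "thehindu.com", "ndtv.com", "livemint.com",
   "techcrunch.com", "arstechnica.com", "wired.com",
   "snopes.com", "factcheck.org", "politifact.com"]

def pvTier3 : PySem.Set String := PySem.Set.ofList
  ["medium.com", "substack.com", "wordpress.com",
   "forbes.com", "businessinsider.com", "huffpost.com",
   "indiatimes.com", "timesofindia.indiatimes.com"]

def pvGovEduTlds : PySem.Set String := PySem.Set.ofList
  [".gov", ".edu", ".ac.uk", ".gov.in", ".nic.in"]

-- A's 'for tld in GOV_EDU_TLDS: if domain.endswith(tld): return 9' — every hit returns the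
-- same constant, so Python's unmodelled set-iteration order cannot affect the result
def pvTldLoop (dc : List Char) : List String → Option Int
  | [] => none
  | tld :: rest => if PySem.Chars.endswith dc tld.toList then some 9 else pvTldLoop dc rest

-- A's two subdomain loops: 'if domain.endswith("." + t): return score'
def pvSubLoop (dc : List Char) (score : Int) : List String → Option Int
  | [] => none
  | t :: rest => if PySem.Chars.endswith dc ('.' :: t.toList) then some score else pvSubLoop dc score rest

def domain_score_py (domain : String) : Int :=
  if pvTier1.contains domain then 10
  else if pvTier2.contains domain then 7
  else if pvTier3.contains domain then 4
  else match pvTldLoop domain.toList pvGovEduTlds with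
  | some r => r
  | none => match pvSubLoop domain.toList 9 pvTier1 with
    | some r => r
    | none => match pvSubLoop domain.toList 7 pvTier2 with
      | some r => r
      | none => 2

-- ===== PORT B =====
-- B's GOV_EDU_SUFFIXES = {t[1:] for t in GOV_EDU_TLDS}
def pvGovEduSuffixes : PySem.Set (List Char) :=
  PySem.Set.ofList (pvGovEduTlds.map (fun t => t.toList.drop 1))

-- B's '[domain[i+1:] for i, c in enumerate(domain) if c == "."]': the tail after each '.'
def pvSuffixes : List Char → List (List Char)
  | [] => []
  | c :: cs => if c = '.' then cs :: pvSuffixes cs else pvSuffixes cs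

def domain_score_py_alt (domain : String) : Int :=
  if pvTier1.contains domain then 10
  else if pvTier2.contains domain then 7
  else if pvTier3.contains domain then 4
  else if (pvSuffixes domain.toList).any (fun s => pvGovEduSuffixes.contains s) then 9
  else if (pvSuffixes domain.toList).any (fun s => (pvTier1.map String.toList).contains s) then 9
  else if (pvSuffixes domain.toList).any (fun s => (pvTier2.map String.toList).contains s) then 7
  else 2

-- ===== PRECONDITION & SPEC =====
def Spec_domain_score_py (domain : String) (out : Int) : Prop := out = domain_score_py_alt domain
instance (domain : String) (out : Int) : Decidable (Spec_domain_score_py domain out) := by unfold Spec_domain_score_py; infer_instance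

-- ===== CLAIM (what is proved, stated in full; the proofs are below) =====
def Claim_equal_domain_score_py : Prop := ∀ (domain : String), Dom_domain_score_py domain → Spec_domain_score_py domain (domain_score_py domain)

-- ===== LEMMAS AND PROOFS =====

lemma mem_pvSuffixes (t : List Char) : ∀ cs : List Char, t ∈ pvSuffixes cs ↔ ('.' :: t) <:+ cs := by
  intro cs
  induction cs with
  | nil => simp [pvSuffixes]
  | cons c cs ih =>
    simp only [pvSuffixes]
    rw [List.suffix_cons_iff]
    by_cases hc : c = '.'
    · subst hc; simp [ih, List.cons.injEq]
    · simp [hc, ih, List.cons.injEq]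
      exact fun h _ => absurd h.symm hc

-- A's endswith-scan over '.'-prefixed patterns equals B's membership scan over the suffixes
lemma pv_key (dc : List Char) (us : List (List Char)) :
    (us.any fun u => PySem.Chars.endswith dc ('.' :: u))
      = ((pvSuffixes dc).any fun s => us.contains s) := by
  rw [Bool.eq_iff_iff]
  simp only [List.any_eq_true, PySem.Chars.endswith_iff, List.contains_iff_mem,
    mem_pvSuffixes]
  exact ⟨fun ⟨u, hu, h⟩ => ⟨u, h, hu⟩, fun ⟨s, hs, h⟩ => ⟨s, h, hs⟩⟩

lemma pvTldLoop_eq (dc : List Char) (ts : List String) :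
    pvTldLoop dc ts = if ts.any (fun t => PySem.Chars.endswith dc t.toList) then some 9 else none := by
  induction ts with
  | nil => simp [pvTldLoop]
  | cons t ts ih => simp only [pvTldLoop, List.any_cons, ih]; by_cases h : PySem.Chars.endswith dc t.toList <;> simp [h]

lemma pvSubLoop_eq (dc : List Char) (k : Int) (ts : List String) :
    pvSubLoop dc k ts = if ts.any (fun t => PySem.Chars.endswith dc ('.' :: t.toList)) then some k else none := by
  induction ts with
  | nil => simp [pvSubLoop]
  | cons t ts ih => simp only [pvSubLoop, List.any_cons, ih]; by_cases h : PySem.Chars.endswith dc ('.' :: t.toList) <;> simp [h]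

-- the five TLD literals, stripped of their leading dot
lemma pvGovEduTlds_shape :
    pvGovEduTlds.map String.toList
      = (pvGovEduTlds.map (fun t => t.toList.drop 1)).map (fun u => '.' :: u) := by decide

lemma pv_tld_bool (dc : List Char) :
    (pvGovEduTlds.any fun t => PySem.Chars.endswith dc t.toList)
      = ((pvSuffixes dc).any fun s => pvGovEduSuffixes.contains s) := by
  have h1 : (pvGovEduTlds.any fun t => PySem.Chars.endswith dc t.toList)
      = ((pvGovEduTlds.map String.toList).any fun l => PySem.Chars.endswith dc l) := by
    rw [List.any_map]; rfl
  rw [h1, pvGovEduTlds_shape, List.any_map]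
  have h2 : ((pvGovEduTlds.map fun t => t.toList.drop 1).any
      fun u => PySem.Chars.endswith dc ('.' :: u))
      = ((pvSuffixes dc).any fun s => (pvGovEduTlds.map fun t => t.toList.drop 1).contains s) :=
    pv_key dc _
  rw [show (((PySem.Chars.endswith dc) ∘ fun u => '.' :: u))
      = fun u => PySem.Chars.endswith dc ('.' :: u) from rfl, h2]
  have h3 : pvGovEduSuffixes = pvGovEduTlds.map (fun t => t.toList.drop 1) := by decide
  rw [h3]
  rfl

lemma pv_tier_bool (dc : List Char) (ts : List String) :
    (ts.any fun t => PySem.Chars.endswith dc ('.' :: t.toList))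
      = ((pvSuffixes dc).any fun s => (ts.map String.toList).contains s) := by
  have := pv_key dc (ts.map String.toList)
  rw [List.any_map] at this
  exact this

-- ===== VERDICT (by name: the statement is the Claim_ definition above) =====
theorem domain_score_py_spec : Claim_equal_domain_score_py := by
  intro domain _
  unfold Spec_domain_score_py domain_score_py domain_score_py_alt
  rw [pvTldLoop_eq, pvSubLoop_eq, pvSubLoop_eq, pv_tld_bool, pv_tier_bool, pv_tier_bool]
  split_ifs <;> rfl
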